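-- pv_equiv track=rewrite | github.com/bmichele/poetry_generation | scripts/build_training_corpus.py | multiline_examples_from_poem
-- ===== SOURCE A (Python) =====
-- from typing import List, Tuple
--
-- def multiline_examples_from_poem(
--     poem: List[str], window: int, sep_token: str
-- ) -> List[Tuple[str, str]]:
--     examples = []
--     line_count = len(poem)
--     i = 0
--     for i in range(1, min(window, line_count)):
--         src = sep_token.join(poem[:i][-window:]) + sep_token
--         tgt = poem[i]
--         example = (src, tgt)
--         examples.append(example)
--     while i < line_count - 1:
--         i += 1
--         src = sep_token.join(poem[i - window : i]) + sep_token
--         tgt = poem[i]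
--         example = (src, tgt)
--         examples.append(example)
--     return examples
-- ===== SOURCE B (Python) =====
-- from typing import List, Tuple
--
-- def multiline_examples_from_poem(
--     poem: List[str], window: int, sep_token: str
-- ) -> List[Tuple[str, str]]:
--     # One pass with a maintained sliding buffer of the most recent lines,
--     # instead of re-slicing the poem for every example.
--     examples = []
--     buf = []
--     for i in range(1, len(poem)):
--         buf.append(poem[i - 1])
--         if window < len(buf):
--             del buf[0]
--         examples.append((sep_token.join(buf) + sep_token, poem[i]))
--     return examples
-- ===== Notes on version B (the rewrite author's own statement) =====
-- stated objective: alternative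
-- what changed: Replaced A's two-phase control flow (a for-loop over early targets slicing poem[:i][-window:], then a while-loop slicing poem[i-window:i]) with a single loop over all target indices that maintains a sliding window buffer incrementally (append the previous line, drop the oldest when the buffer exceeds the window).
import Mathlib
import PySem

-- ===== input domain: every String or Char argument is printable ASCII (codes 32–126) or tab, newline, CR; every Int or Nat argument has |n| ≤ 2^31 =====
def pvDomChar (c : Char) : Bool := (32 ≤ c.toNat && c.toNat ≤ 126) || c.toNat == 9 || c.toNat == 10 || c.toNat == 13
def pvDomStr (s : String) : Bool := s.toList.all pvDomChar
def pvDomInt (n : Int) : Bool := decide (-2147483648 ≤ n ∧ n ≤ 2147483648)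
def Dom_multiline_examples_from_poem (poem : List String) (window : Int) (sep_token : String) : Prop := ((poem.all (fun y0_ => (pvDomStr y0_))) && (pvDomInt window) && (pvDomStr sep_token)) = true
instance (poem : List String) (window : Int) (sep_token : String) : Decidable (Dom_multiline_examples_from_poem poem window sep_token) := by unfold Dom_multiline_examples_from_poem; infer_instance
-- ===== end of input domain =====

-- B replaces A's two-phase reslicing with one pass maintaining a sliding buffer of recent lines (objective: alternative; same cost).

-- ===== PORT A =====
-- A's 'while i < line_count - 1: i += 1; …' loop
def pvAWhile (poem : List String) (window : Int) (sep_token : String) (i : Int) (examples : List (String × String)) : List (String × String) :=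
  if _h : i < (poem.length : Int) - 1 then
    let i' := i + 1
    let src := PySem.Str.join sep_token (PySem.List.slice poem (some (i' - window)) (some i')) ++ sep_token
    pvAWhile poem window sep_token i' (examples ++ [(src, PySem.List.pyGetD poem i' "")])
  else examples
termination_by ((poem.length : Int) - 1 - i).toNat
decreasing_by omega

def multiline_examples_from_poem (poem : List String) (window : Int) (sep_token : String) : List (String × String) :=
  let line_count : Int := (poem.length : Int)
  let st := (PySem.List.pyRange 1 (min window line_count) 1).foldl
    (fun (st : Int × List (String × String)) i =>
      let src := PySem.Str.join sep_token
        (PySem.List.slice (PySem.List.slice poem none (some i)) (some (-window)) none) ++ sep_token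
      (i, st.2 ++ [(src, PySem.List.pyGetD poem i "")]))
    (0, [])
  pvAWhile poem window sep_token st.1 st.2

-- ===== PORT B =====
def multiline_examples_from_poem_alt (poem : List String) (window : Int) (sep_token : String) : List (String × String) :=
  ((PySem.List.pyRange 1 (poem.length : Int) 1).foldl
    (fun (st : List String × List (String × String)) i =>
      let buf0 := st.1 ++ [PySem.List.pyGetD poem (i - 1) ""]
      let buf := if window < (buf0.length : Int) then buf0.tail else buf0  -- 'del buf[0]' (buf0 nonempty)
      (buf, st.2 ++ [(PySem.Str.join sep_token buf ++ sep_token, PySem.List.pyGetD poem i "")]))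
    ([], [])).2

-- ===== PRECONDITION & SPEC =====
def Spec_multiline_examples_from_poem (poem : List String) (window : Int) (sep_token : String) (out : List (String × String)) : Prop := out = multiline_examples_from_poem_alt poem window sep_token
instance (poem : List String) (window : Int) (sep_token : String) (out : List (String × String)) : Decidable (Spec_multiline_examples_from_poem poem window sep_token out) := by unfold Spec_multiline_examples_from_poem; infer_instance

-- ===== CLAIM (what is proved, stated in full; the proofs are below) =====
def Claim_equal_multiline_examples_from_poem : Prop := ∀ (poem : List String) (window : Int) (sep_token : String), Dom_multiline_examples_from_poem poem window sep_token → Spec_multiline_examples_from_poem poem window sep_token (multiline_examples_from_poem poem window sep_token)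

-- ===== LEMMAS AND PROOFS =====

-- the window buffer both programs join for target index j
def pvWbuf (poem : List String) (window : Int) (j : Nat) : List String :=
  if window ≤ 0 then [] else (poem.take j).drop (j - window.toNat)

-- the example emitted for target index j
def pvF (poem : List String) (window : Int) (sep : String) (j : Nat) : String × String :=
  (PySem.Str.join sep (pvWbuf poem window j) ++ sep, poem.getD j "")

lemma pvWbuf_zero (poem : List String) (window : Int) : pvWbuf poem window 0 = [] := by
  unfold pvWbuf; split <;> simp

-- B's buffer step: append the previous line, trim the head when over the window
lemma pvStep (poem : List String) (window : Int) (n : Nat) (h1 : 1 ≤ n) (h2 : n ≤ poem.length) :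
    (if window < ((pvWbuf poem window (n-1) ++ [poem.getD (n-1) ""]).length : Int)
      then (pvWbuf poem window (n-1) ++ [poem.getD (n-1) ""]).tail
      else pvWbuf poem window (n-1) ++ [poem.getD (n-1) ""]) = pvWbuf poem window n := by
  have hn : n - 1 < poem.length := by omega
  have hget : poem.getD (n-1) "" = poem[n-1] := List.getD_eq_getElem poem "" hn
  unfold pvWbuf
  by_cases hw : window ≤ 0
  · simp only [if_pos hw, List.nil_append, List.length_cons, List.length_nil]
    rw [if_pos (by omega), List.tail_cons]
  · simp only [if_neg hw]
    set W := window.toNat with hWdef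
    have hWw : (W : Int) = window := Int.toNat_of_nonneg (by omega)
    have hW1 : 1 ≤ W := by omega
    have htk : poem.take ((n-1)+1) = poem.take (n-1) ++ [poem[n-1]] :=
      List.take_succ_eq_append_getElem hn
    have htn : (n-1)+1 = n := by omega
    rw [htn] at htk
    have hb : (poem.take (n-1)).drop (n-1-W) ++ [poem.getD (n-1) ""]
        = (poem.take n).drop (n-1-W) := by
      rw [hget, htk, List.drop_append_of_le_length (by simp; omega)]
    rw [hb]
    have hlen : ((poem.take n).drop (n-1-W)).length = n - (n-1-W) := by
      simp [Nat.min_eq_left h2]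
    by_cases hc : W ≤ n - 1
    · rw [if_pos (by rw [hlen]; omega), List.tail_drop]
      congr 1; omega
    · rw [if_neg (by rw [hlen]; omega)]
      congr 1; omega

-- B's fold over range(1, n) builds the buffer and the emitted examples
lemma pvB_fold (poem : List String) (window : Int) (sep : String) :
    ∀ n : Nat, n ≤ poem.length →
    (PySem.List.pyRange 1 (n : Int) 1).foldl
      (fun (st : List String × List (String × String)) i =>
        let buf0 := st.1 ++ [PySem.List.pyGetD poem (i - 1) ""]
        let buf := if window < (buf0.length : Int) then buf0.tail else buf0
        (buf, st.2 ++ [(PySem.Str.join sep buf ++ sep, PySem.List.pyGetD poem i "")]))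
      ([], [])
    = (pvWbuf poem window (n-1), (List.range (n-1)).map (fun k => pvF poem window sep (1+k))) := by
  intro n
  induction n with
  | zero => intro _; rw [PySem.List.pyRange_one_eq_nil (by omega)]; simp [pvWbuf_zero]
  | succ m ih =>
    intro hm
    rcases Nat.eq_zero_or_pos m with hm0 | hm1
    · subst hm0
      rw [PySem.List.pyRange_one_eq_nil (by omega)]
      simp [pvWbuf_zero]
    · have hcast : ((m+1 : Nat) : Int) = (m : Int) + 1 := by push_cast; ring
      rw [hcast, PySem.List.pyRange_one_succ_right (by omega), List.foldl_append]
      rw [ih (by omega)]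
      simp only [List.foldl_cons, List.foldl_nil]
      have hg1 : PySem.List.pyGetD poem ((m : Int) - 1) "" = poem.getD (m-1) "" := by
        have : ((m : Int) - 1) = ((m-1 : Nat) : Int) := by omega
        rw [this, PySem.List.pyGetD_natCast]
      have hg2 : PySem.List.pyGetD poem (m : Int) "" = poem.getD m "" := PySem.List.pyGetD_natCast poem m ""
      have hstep := pvStep poem window m hm1 (by omega)
      simp only [hg1, hg2, hstep, Prod.mk.injEq]
      refine ⟨by congr 1, ?_⟩
      have : m + 1 - 1 = (m - 1) + 1 := by omega
      rw [this, List.range_succ, List.map_append]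
      congr 1
      simp only [List.map_cons, List.map_nil]
      unfold pvF
      have h1m : 1 + (m - 1) = m := by omega
      rw [h1m]

-- the slice A's while-loop takes equals the window buffer, for indices past the window
lemma pvSliceWhile (poem : List String) (window : Int) (i : Nat) (_hi : i < poem.length)
    (hw : window ≤ (i : Int)) :
    PySem.List.slice poem (some ((i : Int) - window)) (some (i : Int)) = pvWbuf poem window i := by
  by_cases h0 : window ≤ 0
  · rw [PySem.List.slice_toNat poem (by omega) (by omega)]
    unfold pvWbuf
    rw [if_pos h0]
    have : (i : Int).toNat - ((i : Int) - window).toNat = 0 := by omega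
    rw [this, List.take_zero]
  · unfold pvWbuf
    rw [if_neg h0, PySem.List.slice_toNat poem (by omega) (by omega), List.drop_take]
    have e1 : ((i : Int)).toNat = i := by omega
    have e2 : ((i : Int) - window).toNat = i - window.toNat := by omega
    rw [e1, e2]

-- A's while-loop from index j emits exactly the canonical examples for j+1 … len-1
lemma pvAWhile_eq (poem : List String) (window : Int) (sep : String) :
    ∀ (fuel : Nat) (j : Nat) (ex : List (String × String)),
    poem.length - 1 - j = fuel →
    (∀ i : Nat, j < i → i < poem.length →
      PySem.List.slice poem (some ((i : Int) - window)) (some (i : Int)) = pvWbuf poem window i) →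
    pvAWhile poem window sep (j : Int) ex
      = ex ++ (List.range (poem.length - 1 - j)).map (fun k => pvF poem window sep (j+1+k)) := by
  intro fuel
  induction fuel with
  | zero =>
    intro j ex hf _
    rw [pvAWhile, dif_neg (by omega), hf]
    simp
  | succ m ih =>
    intro j ex hf H
    have hj : j + 1 < poem.length := by omega
    rw [pvAWhile, dif_pos (by omega)]
    have hc : (j : Int) + 1 = ((j+1 : Nat) : Int) := by push_cast; ring
    simp only [hc]
    rw [ih (j+1) _ (by omega) (fun i h1 h2 => H i (by omega) h2)]
    have hsl : PySem.List.slice poem (some (((j+1 : Nat) : Int) - window)) (some ((j+1 : Nat) : Int))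
        = pvWbuf poem window (j+1) := H (j+1) (by omega) hj
    rw [hsl, PySem.List.pyGetD_natCast, List.append_assoc]
    congr 1
    rw [hf]
    have hm : poem.length - 1 - (j+1) = m := by omega
    rw [hm, List.range_succ_eq_map, List.map_cons, List.map_map]
    simp only [List.singleton_append, Function.comp_def, Nat.add_zero, Nat.succ_eq_add_one]
    congr 1
    refine List.map_congr_left (fun k _ => ?_)
    have hk : j + 1 + 1 + k = j + 1 + (k + 1) := by omega
    rw [hk]

-- the slice A's for-loop takes (poem[:i][-window:]) equals the window buffer for i < window
lemma pvSliceFor (poem : List String) (window : Int) (i : Nat) (hi : i < poem.length)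
    (hw : (i : Int) < window) (h0 : 0 < window) :
    PySem.List.slice (PySem.List.slice poem none (some (i : Int))) (some (-window)) none
      = pvWbuf poem window i := by
  have hWw : ((window.toNat : Nat) : Int) = window := Int.toNat_of_nonneg (by omega)
  rw [PySem.List.slice_to_natCast poem i, ← hWw,
      PySem.List.slice_from_neg_natCast _ window.toNat (by omega)]
  unfold pvWbuf
  rw [if_neg (by omega)]
  congr 1
  simp [Nat.min_eq_left (by omega : i ≤ poem.length)]
  omega

-- A's for-loop over range(1, min(window, line_count)) with its carried loop variable
lemma pvA_for (poem : List String) (window : Int) (sep : String) (_h2 : 2 ≤ min window (poem.length : Int)) :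
    ∀ t : Nat, (t : Int) ≤ min window (poem.length : Int) - 1 →
    (PySem.List.pyRange 1 (1 + (t : Int)) 1).foldl
      (fun (st : Int × List (String × String)) i =>
        let src := PySem.Str.join sep
          (PySem.List.slice (PySem.List.slice poem none (some i)) (some (-window)) none) ++ sep
        (i, st.2 ++ [(src, PySem.List.pyGetD poem i "")]))
      (0, [])
    = ((if t = 0 then 0 else (t : Int)), (List.range t).map (fun k => pvF poem window sep (1+k))) := by
  intro t
  induction t with
  | zero => intro _; rw [PySem.List.pyRange_one_eq_nil (by omega)]; simp
  | succ m ih =>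
    intro ht
    have hcast : (1 : Int) + ((m+1 : Nat) : Int) = (1 + (m : Int)) + 1 := by push_cast; ring
    rw [hcast, PySem.List.pyRange_one_succ_right (by omega), List.foldl_append]
    rw [ih (by push_cast at ht ⊢; omega)]
    simp only [List.foldl_cons, List.foldl_nil]
    have hidx : (1 : Int) + (m : Int) = ((1+m : Nat) : Int) := by push_cast; ring
    have hlt : ((1+m : Nat) : Int) < window := by push_cast; push_cast at ht; omega
    have hlen : (1+m : Nat) < poem.length := by
      have : ((1+m : Nat) : Int) < (poem.length : Int) := by push_cast; push_cast at ht; omega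
      exact_mod_cast this
    have hsl := pvSliceFor poem window (1+m) hlen hlt (by omega)
    rw [hidx, hsl, PySem.List.pyGetD_natCast]
    simp only [Prod.mk.injEq]
    refine ⟨by simp; ring, ?_⟩
    rw [List.range_succ, List.map_append]
    congr 1

-- ===== VERDICT (by name: the statement is the Claim_ definition above) =====
theorem multiline_examples_from_poem_spec : Claim_equal_multiline_examples_from_poem := by
  intro poem window sep _dom
  unfold Spec_multiline_examples_from_poem
  unfold multiline_examples_from_poem multiline_examples_from_poem_alt
  dsimp only
  rw [pvB_fold poem window sep poem.length le_rfl]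
  by_cases hm : min window (poem.length : Int) ≤ 1
  · -- for-loop empty; i stays 0
    rw [PySem.List.pyRange_one_eq_nil (by omega)]
    simp only [List.foldl_nil]
    have h0 : (0 : Int) = ((0 : Nat) : Int) := rfl
    rw [h0, pvAWhile_eq poem window sep (poem.length - 1 - 0) 0 [] rfl]
    · simp only [List.nil_append, Nat.sub_zero, Nat.zero_add]
    · intro i h1 h2
      apply pvSliceWhile poem window i h2
      rcases min_le_iff.mp hm with h | h <;> omega
  · -- for-loop runs up to min(window, line_count) - 1
    rw [not_le] at hm
    set m : Int := min window (poem.length : Int) with hmdef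
    have h2 : 2 ≤ m := by omega
    have hwin2 : 2 ≤ window := by have := min_le_left window ((poem.length : Int)); omega
    have hlen2 : 2 ≤ (poem.length : Int) := by have := min_le_right window ((poem.length : Int)); omega
    set t : Nat := (m - 1).toNat with htdef
    have hmle : m ≤ window := min_le_left _ _
    have hmlen : m ≤ (poem.length : Int) := min_le_right _ _
    have ht1 : 1 ≤ t := by omega
    have hmt : 1 + (t : Int) = m := by omega
    rw [← hmt, pvA_for poem window sep h2 t (by omega)]
    simp only [if_neg (by omega : ¬ t = 0)]
    rw [pvAWhile_eq poem window sep (poem.length - 1 - t) t _ rfl]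
    · have htle : t ≤ poem.length - 1 := by omega
      have hsplit : poem.length - 1 = t + (poem.length - 1 - t) := by omega
      conv_rhs => rw [hsplit, List.range_add, List.map_append, List.map_map]
      congr 1
      simp only [Function.comp_def]
      refine List.map_congr_left (fun k _ => ?_)
      have hk : t + 1 + k = 1 + (t + k) := by omega
      rw [hk]
    · intro i h1 h2'
      apply pvSliceWhile poem window i h2'
      by_cases hw : window ≤ (poem.length : Int)
      · have hme : m = window := min_eq_left hw
        omega
      · have hme : m = (poem.length : Int) := min_eq_right (by omega)
        omega
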